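-- pv_equiv track=rewrite | github.com/drakempham/Technical | algorithm + contest/pattern/contest.py | validDigit
-- ===== SOURCE A (Python) =====
-- def validDigit(n: int, x: int) -> bool:
--     has_x = False
--     first_digit = None
--
--     while n > 0:
--         digit = n % 10
--         first_digit = digit
--         n = n // 10
--
--         if digit == x:
--             has_x = True
--
--     return has_x and first_digit != x
-- ===== SOURCE B (Python) =====
-- def validDigit(n: int, x: int) -> bool:
--     if n <= 0:
--         return False
--     digits = [int(c) for c in str(n)]
--     return x in digits and digits[0] != x
-- ===== Notes on version B (the rewrite author's own statement) =====
-- stated objective: idiomatic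
-- what changed: Replaces arithmetic least-significant-first digit peeling with mutable has_x/first_digit state by converting n to its decimal string, taking its first element as the leading digit and testing membership directly.
import Mathlib
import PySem

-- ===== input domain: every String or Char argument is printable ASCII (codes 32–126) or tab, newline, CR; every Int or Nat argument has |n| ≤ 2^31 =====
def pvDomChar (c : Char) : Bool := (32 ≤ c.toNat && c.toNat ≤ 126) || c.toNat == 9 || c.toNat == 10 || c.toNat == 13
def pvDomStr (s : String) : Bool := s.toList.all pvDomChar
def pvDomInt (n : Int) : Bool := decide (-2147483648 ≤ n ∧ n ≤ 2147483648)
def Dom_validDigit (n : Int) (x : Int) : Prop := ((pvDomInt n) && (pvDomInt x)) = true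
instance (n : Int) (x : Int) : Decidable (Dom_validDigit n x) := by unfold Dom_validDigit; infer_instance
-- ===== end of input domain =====

-- B replaces A's arithmetic least-significant-first digit peeling (mutable has_x / first_digit
-- state) with the decimal-string representation of n: leading digit = first element, membership
-- test for "x appears". Objective: idiomatic; same asymptotic cost.


-- ===== PORT A =====
-- A's while loop, carrying (has_x, first_digit) as explicit state
def validDigitLoop (n : Int) (x : Int) (has_x : Bool) (first_digit : Option Int) : Bool :=
  if h : 0 < n then
    let digit := PySem.Int.mod n 10
    let first_digit' := some digit
    let n' := PySem.Int.floordiv n 10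
    let has_x' := if digit == x then true else has_x
    validDigitLoop n' x has_x' first_digit'
  else
    has_x && decide (first_digit ≠ some x)
termination_by n.toNat
decreasing_by
  exact (by rw [PySem.Int.floordiv_eq_ediv_of_pos (by norm_num)]; omega :
    (PySem.Int.floordiv n 10).toNat < n.toNat)

def validDigit (n : Int) (x : Int) : Bool :=
  validDigitLoop n x false none

-- ===== PORT B =====
-- int(c) on the single characters of str(n); PySem.Int.ofChars? [c] = int(c), exact
def validDigit_alt (n : Int) (x : Int) : Bool :=
  if n ≤ 0 then false
  else
    let digits := (PySem.Int.toStr n).toList.map (fun c => (PySem.Int.ofChars? [c]).getD 0)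
    decide (x ∈ digits) && decide (digits.headD 0 ≠ x)  -- digits ≠ []: str(n) of n > 0 is nonempty, so headD's default is never used

-- ===== PRECONDITION & SPEC =====
def Spec_validDigit (n : Int) (x : Int) (out : Bool) : Prop := out = validDigit_alt n x
instance (n : Int) (x : Int) (out : Bool) : Decidable (Spec_validDigit n x out) := by unfold Spec_validDigit; infer_instance

-- ===== CLAIM (what is proved, stated in full; the proofs are below) =====
def Claim_equal_validDigit : Prop := ∀ (n : Int) (x : Int), Dom_validDigit n x → Spec_validDigit n x (validDigit n x)

-- ===== LEMMAS AND PROOFS =====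

-- decimal digits of a Nat, most significant first (the common spec both ports are reduced to)
def pvDigits (m : Nat) : List Nat :=
  if _ : m / 10 = 0 then [m % 10] else pvDigits (m / 10) ++ [m % 10]
decreasing_by exact Nat.div_lt_self (by omega) (by omega)

def pvDigitsI (m : Nat) : List Int := (pvDigits m).map Int.ofNat

-- the most significant (leading) decimal digit
def pvMsd (m : Nat) : Nat :=
  if _ : m / 10 = 0 then m % 10 else pvMsd (m / 10)
decreasing_by exact Nat.div_lt_self (by omega) (by omega)

theorem pvDigits_small (m : Nat) (h : m / 10 = 0) : pvDigits m = [m % 10] := by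
  conv_lhs => rw [pvDigits]
  rw [dif_pos h]

theorem pvDigits_step (m : Nat) (h : ¬ m / 10 = 0) :
    pvDigits m = pvDigits (m / 10) ++ [m % 10] := by
  conv_lhs => rw [pvDigits]
  rw [dif_neg h]

theorem pvMsd_small (m : Nat) (h : m / 10 = 0) : pvMsd m = m % 10 := by
  conv_lhs => rw [pvMsd]
  rw [dif_pos h]

theorem pvMsd_step (m : Nat) (h : ¬ m / 10 = 0) : pvMsd m = pvMsd (m / 10) := by
  conv_lhs => rw [pvMsd]
  rw [dif_neg h]

theorem pvDigits_ne_nil (m : Nat) : pvDigits m ≠ [] := by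
  by_cases h : m / 10 = 0
  · rw [pvDigits_small m h]; simp
  · rw [pvDigits_step m h]; simp

theorem pvDigits_lt (m : Nat) : ∀ d ∈ pvDigits m, d < 10 := by
  induction m using pvDigits.induct with
  | case1 m h => rw [pvDigits_small m h]; intro d hd; simp at hd; omega
  | case2 m h ih =>
    rw [pvDigits_step m h]; intro d hd
    rcases List.mem_append.1 hd with h1 | h1
    · exact ih d h1
    · simp at h1; omega

-- characterisation of A's while loop on positive inputs
theorem pvLoop_eq (m : Nat) (x : Int) : 0 < m → ∀ hx fd,
    validDigitLoop (m : Int) x hx fd =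
      ((hx || decide (x ∈ pvDigitsI m)) && decide ((pvMsd m : Int) ≠ x)) := by
  induction m using pvDigits.induct with
  | case1 m h =>
    intro hm hx fd
    unfold validDigitLoop
    rw [dif_pos (by exact_mod_cast hm)]
    have hmod : PySem.Int.mod (m : Int) 10 = ((m % 10 : Nat) : Int) := by
      exact_mod_cast PySem.Int.mod_natCast m 10
    have hdiv : PySem.Int.floordiv (m : Int) 10 = ((m / 10 : Nat) : Int) := by
      exact_mod_cast PySem.Int.floordiv_natCast m 10
    simp only [hmod, hdiv, h]
    unfold validDigitLoop
    rw [dif_neg (by simp)]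
    simp only [pvDigitsI]
    simp only [pvDigits_small m h, pvMsd_small m h]
    by_cases hxe : ((m % 10 : Nat) : Int) = x
    · simp [hxe]
    · simp only [List.map, List.mem_singleton, beq_iff_eq, if_neg hxe]
      have hxe' : ¬ x = ((m : Int) % 10) := by omega
      simp [hxe']
  | case2 m h ih =>
    intro hm hx fd
    unfold validDigitLoop
    rw [dif_pos (by exact_mod_cast hm)]
    have hmod : PySem.Int.mod (m : Int) 10 = ((m % 10 : Nat) : Int) := by
      exact_mod_cast PySem.Int.mod_natCast m 10
    have hdiv : PySem.Int.floordiv (m : Int) 10 = ((m / 10 : Nat) : Int) := by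
      exact_mod_cast PySem.Int.floordiv_natCast m 10
    simp only [hmod, hdiv]
    rw [ih (by omega) _ _]
    simp only [pvDigitsI]
    simp only [pvDigits_step m h, pvMsd_step m h]
    by_cases hxe : ((m % 10 : Nat) : Int) = x
    · simp only [beq_iff_eq, if_pos hxe, List.map_append, List.map, List.mem_append,
        List.mem_singleton]
      have hxe' : x = ((m : Int) % 10) := by omega
      simp [hxe']
    · simp only [beq_iff_eq, if_neg hxe, List.map_append, List.map, List.mem_append,
        List.mem_singleton]
      have hxe' : ¬ x = ((m : Int) % 10) := by omega
      simp [hxe']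

-- Nat.toDigitsCore with enough fuel produces pvDigits (as chars) before the accumulator
theorem pvToDigitsCore_eq (fuel : Nat) : ∀ m l, m < fuel →
    Nat.toDigitsCore 10 fuel m l = (pvDigits m).map Nat.digitChar ++ l := by
  induction fuel with
  | zero => intro m l h; omega
  | succ f ih =>
    intro m l h
    show (if m / 10 = 0 then (m % 10).digitChar :: l
          else Nat.toDigitsCore 10 f (m / 10) ((m % 10).digitChar :: l)) = _
    by_cases h0 : m / 10 = 0
    · rw [if_pos h0, pvDigits_small m h0]; simp
    · rw [if_neg h0, pvDigits_step m h0, ih (m / 10) _ (by omega)]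
      simp

theorem pvToChars_eq (m : Nat) : Nat.toDigits 10 m = (pvDigits m).map Nat.digitChar := by
  have := pvToDigitsCore_eq (m + 1) m [] (by omega)
  simpa [Nat.toDigits] using this

-- int('<d>') recovers a decimal digit
theorem pvOfChars_digitChar (d : Nat) (hd : d < 10) :
    (PySem.Int.ofChars? [Nat.digitChar d]).getD 0 = Int.ofNat d := by
  interval_cases d <;> decide

-- the head of the digit list is the leading digit
theorem pvDigits_headD (m : Nat) : (pvDigits m).headD 0 = pvMsd m := by
  induction m using pvDigits.induct with
  | case1 m h => rw [pvDigits_small m h, pvMsd_small m h]; rfl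
  | case2 m h ih =>
    rw [pvDigits_step m h, pvMsd_step m h]
    rcases hD : pvDigits (m / 10) with _ | ⟨a, t⟩
    · exact absurd hD (pvDigits_ne_nil (m / 10))
    · rw [← ih, hD]; rfl

-- B on a positive input, reduced to the same pvDigitsI / pvMsd spec
theorem pvAlt_eq (m : Nat) (x : Int) (hm : 0 < m) :
    validDigit_alt (m : Int) x =
      (decide (x ∈ pvDigitsI m) && decide ((pvMsd m : Int) ≠ x)) := by
  unfold validDigit_alt
  rw [if_neg (by omega)]
  have h1 : (PySem.Int.toStr (m : Int)).toList = Nat.toDigits 10 m := by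
    rw [PySem.Int.toList_toStr]
    show PySem.Int.toChars (m : Int) = _
    unfold PySem.Int.toChars
    rw [if_neg (by omega)]
    congr 1
  simp only [h1, pvToChars_eq, List.map_map]
  have h2 : (pvDigits m).map ((fun c => (PySem.Int.ofChars? [c]).getD 0) ∘ Nat.digitChar)
      = pvDigitsI m := by
    simp only [pvDigitsI]
    apply List.map_congr_left
    intro d hd
    exact pvOfChars_digitChar d (pvDigits_lt m d hd)
  simp only [h2]
  congr 1
  have h3 : (pvDigitsI m).headD 0 = ((pvDigits m).headD 0 : Int) := by
    rcases hD : pvDigits m with _ | ⟨a, t⟩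
    · exact absurd hD (pvDigits_ne_nil m)
    · simp [pvDigitsI, hD]
  rw [h3, pvDigits_headD]

-- ===== VERDICT (by name: the statement is the Claim_ definition above) =====
theorem validDigit_spec : Claim_equal_validDigit := by
  intro n x _
  show validDigit n x = validDigit_alt n x
  by_cases hn : 0 < n
  · obtain ⟨m, rfl⟩ : ∃ m : Nat, n = (m : Int) := ⟨n.toNat, by omega⟩
    have hm : 0 < m := by exact_mod_cast hn
    rw [pvAlt_eq m x hm]
    unfold validDigit
    rw [pvLoop_eq m x hm false none]
    simp
  · unfold validDigit validDigitLoop validDigit_alt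
    rw [dif_neg hn, if_pos (by omega)]
    simp
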